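-- pv_equiv track=rewrite | github.com/AdaoBJr/Algorithms_Py | challenges/challenge_study_schedule.py | number_of_students_present
-- ===== SOURCE A (Python) =====
-- def number_of_students_present(permanence_period, target_time):
--     number = 0
--     for entry_time, departure_time in permanence_period:
--         if (
--             not type(entry_time) is int
--             or not type(departure_time) is int
--             or departure_time < entry_time
--         ):
--             return None
--         if entry_time <= target_time <= departure_time:
--             number += 1
--
--     return number
-- ===== SOURCE B (Python) =====
-- def number_of_students_present(permanence_period, target_time):
--     intervals = list(permanence_period)
--     if any(type(e) is not int or type(d) is not int or d < e
--            for e, d in intervals):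
--         return None
--     # Event-count subtraction: a student is present at t iff they entered by t
--     # and have not departed before t. Since each valid interval has d >= e,
--     # d < t implies e <= t, so the two counts subtract cleanly.
--     entered = sum(e <= target_time for e, _ in intervals)
--     departed = sum(d < target_time for _, d in intervals)
--     return entered - departed
-- ===== Notes on version B (the rewrite author's own statement) =====
-- stated objective: alternative
-- what changed: Replaces the per-interval membership test with event-count subtraction: after a validation pass, the answer is (# entry times <= t) minus (# departure times < t), correct because validated intervals have d >= e.
import Mathlib
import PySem

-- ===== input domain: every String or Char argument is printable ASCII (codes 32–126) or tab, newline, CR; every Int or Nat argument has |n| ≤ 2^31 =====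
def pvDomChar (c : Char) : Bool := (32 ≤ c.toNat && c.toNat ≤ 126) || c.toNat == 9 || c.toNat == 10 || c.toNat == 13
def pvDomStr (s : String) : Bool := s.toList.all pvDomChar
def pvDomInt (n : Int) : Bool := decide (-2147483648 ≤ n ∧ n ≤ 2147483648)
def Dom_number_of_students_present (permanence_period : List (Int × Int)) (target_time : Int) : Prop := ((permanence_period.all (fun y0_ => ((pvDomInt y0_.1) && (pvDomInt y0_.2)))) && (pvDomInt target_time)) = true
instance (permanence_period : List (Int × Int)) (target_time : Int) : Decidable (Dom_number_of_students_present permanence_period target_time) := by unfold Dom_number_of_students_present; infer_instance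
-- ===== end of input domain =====

-- B replaces A's per-interval membership count by event-count subtraction:
-- after validation, answer = (# entries ≤ t) − (# departures < t), valid since d ≥ e.

-- ===== PORT A =====
def pvLoopA (permanence_period : List (Int × Int)) (target_time : Int) (number : Int) : Option Int :=
  match permanence_period with
  | [] => some number
  | (entry_time, departure_time) :: rest =>
    if departure_time < entry_time then none
    else pvLoopA rest target_time
      (if entry_time ≤ target_time ∧ target_time ≤ departure_time then number + 1 else number)

def number_of_students_present (permanence_period : List (Int × Int)) (target_time : Int) : Option Int :=
  pvLoopA permanence_period target_time 0

-- ===== PORT B =====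
def number_of_students_present_alt (permanence_period : List (Int × Int)) (target_time : Int) : Option Int :=
  if permanence_period.any (fun p => decide (p.2 < p.1)) then
    none
  else
    let entered : Int := ((permanence_period.countP (fun p => decide (p.1 ≤ target_time))) : Int)
    let departed : Int := ((permanence_period.countP (fun p => decide (p.2 < target_time))) : Int)
    some (entered - departed)

-- ===== PRECONDITION & SPEC =====
def Spec_number_of_students_present (permanence_period : List (Int × Int)) (target_time : Int) (out : Option Int) : Prop := out = number_of_students_present_alt permanence_period target_time
instance (permanence_period : List (Int × Int)) (target_time : Int) (out : Option Int) : Decidable (Spec_number_of_students_present permanence_period target_time out) := by unfold Spec_number_of_students_present; infer_instance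

-- ===== CLAIM (what is proved, stated in full; the proofs are below) =====
def Claim_equal_number_of_students_present : Prop := ∀ (permanence_period : List (Int × Int)) (target_time : Int), Dom_number_of_students_present permanence_period target_time → Spec_number_of_students_present permanence_period target_time (number_of_students_present permanence_period target_time)

-- ===== LEMMAS AND PROOFS =====
theorem pvLoopA_eq (l : List (Int × Int)) (t n : Int) :
    pvLoopA l t n =
      (if l.any (fun p => decide (p.2 < p.1)) then none
       else some (n + ((l.countP (fun p => decide (p.1 ≤ t))) : Int)
                    - ((l.countP (fun p => decide (p.2 < t))) : Int))) := by
  induction l generalizing n with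
  | nil => simp [pvLoopA]
  | cons hd tl ih =>
    obtain ⟨e, d⟩ := hd
    simp only [pvLoopA, List.any_cons, List.countP_cons]
    by_cases hde : d < e
    · simp [hde]
    · rw [if_neg hde, ih]
      by_cases hbad : (tl.any fun p => decide (p.2 < p.1)) = true
      · simp [hbad, hde]
      · simp only [hbad, Bool.or_false, decide_eq_true_eq, hde, decide_false,
          Bool.false_or, if_neg hbad, if_neg hde]
        by_cases hmem : e ≤ t ∧ t ≤ d
        · have h1 : (decide (e ≤ t)) = true := by simp [hmem.1]
          have h2 : (decide (d < t)) = false := by simp; omega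
          simp [hmem, h1, h2]
          push_cast
          split_ifs <;> omega
        · by_cases het : e ≤ t
          · have hdt : d < t := by omega
            have h1 : (decide (e ≤ t)) = true := by simp [het]
            have h2 : (decide (d < t)) = true := by simp [hdt]
            simp [hmem, h1, h2]
            push_cast
            split_ifs <;> omega
          · have h1 : (decide (e ≤ t)) = false := by simp [het]
            have h2 : (decide (d < t)) = false := by simp; omega
            have hdt : ¬ d < t := by simpa using h2
            simp [hmem, het, h1, h2]
            omega

-- ===== VERDICT (by name: the statement is the Claim_ definition above) =====
theorem number_of_students_present_spec : Claim_equal_number_of_students_present := by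
  intro l t _
  unfold Spec_number_of_students_present number_of_students_present number_of_students_present_alt
  rw [pvLoopA_eq]
  split <;> simp
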